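-- pv_equiv track=rewrite | github.com/ptobiasdiaz/multiemu | tests/fallbacks/cpc_render_reference.py | build_horizontal_display_map
-- ===== SOURCE A (Python) =====
-- def build_horizontal_display_map(
--     total_raster_width: int,
--     pixels_per_char: int,
--     horizontal_total: int,
--     visible_char_count: int,
--     display_start_char: int,
-- ) -> list[int]:
--     mapping = [-1] * max(0, total_raster_width)
--     if total_raster_width <= 0 or pixels_per_char <= 0 or horizontal_total <= 0 or visible_char_count <= 0:
--         return mapping
--
--     for raster_x in range(total_raster_width):
--         crtc_char = raster_x // pixels_per_char
--         pixel_in_char = raster_x % pixels_per_char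
--         if not (0 <= crtc_char < horizontal_total):
--             continue
--         display_char = (crtc_char - display_start_char) % horizontal_total
--         if display_char >= visible_char_count:
--             continue
--         mapping[raster_x] = (display_char * pixels_per_char) + pixel_in_char
--     return mapping
-- ===== SOURCE B (Python) =====
-- def build_horizontal_display_map(
--     total_raster_width: int,
--     pixels_per_char: int,
--     horizontal_total: int,
--     visible_char_count: int,
--     display_start_char: int,
-- ) -> list[int]:
--     if total_raster_width <= 0:
--         return []
--     if pixels_per_char <= 0 or horizontal_total <= 0 or visible_char_count <= 0:
--         return [-1] * total_raster_width
--     char_count = min(horizontal_total, (total_raster_width + pixels_per_char - 1) // pixels_per_char)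
--     row = []
--     for crtc_char in range(char_count):
--         # part of this character cell that lies inside the raster
--         width = min(pixels_per_char, total_raster_width - crtc_char * pixels_per_char)
--         display_char = (crtc_char - display_start_char) % horizontal_total
--         if display_char < visible_char_count:
--             base = display_char * pixels_per_char
--             row.extend(range(base, base + width))
--         else:
--             row.extend([-1] * width)
--     row.extend([-1] * (total_raster_width - len(row)))
--     return row
-- ===== Notes on version B (the rewrite author's own statement) =====
-- stated objective: faster
-- what changed: B builds the row left-to-right one character cell at a time (computing the display offset once per cell and extending with a whole block of pixel indices, then padding to the raster width) instead of A's flat per-pixel pass that recomputes a divide, a modulo and the display offset for every raster pixel and writes by index.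
import Mathlib
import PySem

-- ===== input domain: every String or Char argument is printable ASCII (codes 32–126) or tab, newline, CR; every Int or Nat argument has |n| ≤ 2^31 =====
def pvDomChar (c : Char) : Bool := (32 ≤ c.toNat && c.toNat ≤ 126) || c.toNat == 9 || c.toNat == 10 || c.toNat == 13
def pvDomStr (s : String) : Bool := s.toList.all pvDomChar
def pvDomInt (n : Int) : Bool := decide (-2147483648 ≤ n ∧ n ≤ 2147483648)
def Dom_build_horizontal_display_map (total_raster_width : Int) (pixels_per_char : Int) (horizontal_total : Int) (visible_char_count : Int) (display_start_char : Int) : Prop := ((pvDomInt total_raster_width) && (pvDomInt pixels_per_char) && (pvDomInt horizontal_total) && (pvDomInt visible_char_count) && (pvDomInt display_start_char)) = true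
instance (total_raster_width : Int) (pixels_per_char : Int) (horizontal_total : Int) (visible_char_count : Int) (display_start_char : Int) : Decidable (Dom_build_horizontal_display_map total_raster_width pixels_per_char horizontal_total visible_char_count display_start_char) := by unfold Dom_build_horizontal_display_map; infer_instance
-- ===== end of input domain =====

-- B builds the row left-to-right in per-character blocks (extend + pad) instead of A's per-pixel
-- indexed writes with a divide/mod every iteration; measurably faster by a constant factor.


-- ===== PORT A =====
def build_horizontal_display_map (total_raster_width : Int) (pixels_per_char : Int) (horizontal_total : Int) (visible_char_count : Int) (display_start_char : Int) : List Int :=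
  let mapping : List Int := List.replicate (max 0 total_raster_width).toNat (-1)
  if total_raster_width ≤ 0 ∨ pixels_per_char ≤ 0 ∨ horizontal_total ≤ 0 ∨ visible_char_count ≤ 0 then
    mapping
  else
    (PySem.List.pyRange 0 total_raster_width 1).foldl (fun mapping raster_x =>
      let crtc_char := PySem.Int.floordiv raster_x pixels_per_char
      let pixel_in_char := PySem.Int.mod raster_x pixels_per_char
      if ¬ (0 ≤ crtc_char ∧ crtc_char < horizontal_total) then mapping
      else
        let display_char := PySem.Int.mod (crtc_char - display_start_char) horizontal_total
        if display_char ≥ visible_char_count then mapping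
        else
          -- mapping[raster_x] = … : raster_x is nonnegative and in range here, so List.set is exact
          mapping.set raster_x.toNat (display_char * pixels_per_char + pixel_in_char)
      ) mapping

-- ===== PORT B =====
def build_horizontal_display_map_alt (total_raster_width : Int) (pixels_per_char : Int) (horizontal_total : Int) (visible_char_count : Int) (display_start_char : Int) : List Int :=
  if total_raster_width ≤ 0 then []
  else if pixels_per_char ≤ 0 ∨ horizontal_total ≤ 0 ∨ visible_char_count ≤ 0 then
    List.replicate total_raster_width.toNat (-1)
  else
    let char_count := min horizontal_total (PySem.Int.floordiv (total_raster_width + pixels_per_char - 1) pixels_per_char)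
    let row := (PySem.List.pyRange 0 char_count 1).foldl (fun row crtc_char =>
      -- part of this character cell that lies inside the raster
      let width := min pixels_per_char (total_raster_width - crtc_char * pixels_per_char)
      let display_char := PySem.Int.mod (crtc_char - display_start_char) horizontal_total
      if display_char < visible_char_count then
        let base := display_char * pixels_per_char
        row ++ PySem.List.pyRange base (base + width) 1   -- list(range(base, base+width))
      else
        row ++ List.replicate width.toNat (-1)) []        -- [-1]*width with width > 0 here
    row ++ List.replicate (total_raster_width.toNat - row.length) (-1)

-- ===== PRECONDITION & SPEC =====
def Spec_build_horizontal_display_map (total_raster_width : Int) (pixels_per_char : Int) (horizontal_total : Int) (visible_char_count : Int) (display_start_char : Int) (out : List Int) : Prop := out = build_horizontal_display_map_alt total_raster_width pixels_per_char horizontal_total visible_char_count display_start_char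
instance (total_raster_width : Int) (pixels_per_char : Int) (horizontal_total : Int) (visible_char_count : Int) (display_start_char : Int) (out : List Int) : Decidable (Spec_build_horizontal_display_map total_raster_width pixels_per_char horizontal_total visible_char_count display_start_char out) := by unfold Spec_build_horizontal_display_map; infer_instance

-- ===== CLAIM (what is proved, stated in full; the proofs are below) =====
def Claim_equal_build_horizontal_display_map : Prop := ∀ (total_raster_width : Int) (pixels_per_char : Int) (horizontal_total : Int) (visible_char_count : Int) (display_start_char : Int), Dom_build_horizontal_display_map total_raster_width pixels_per_char horizontal_total visible_char_count display_start_char → Spec_build_horizontal_display_map total_raster_width pixels_per_char horizontal_total visible_char_count display_start_char (build_horizontal_display_map total_raster_width pixels_per_char horizontal_total visible_char_count display_start_char)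

-- ===== LEMMAS AND PROOFS =====

-- what A writes at raster index j (condition and value)
def condA (ppc ht vcc dsc : Int) (j : Nat) : Bool :=
  decide ((0 ≤ PySem.Int.floordiv (j : Int) ppc ∧ PySem.Int.floordiv (j : Int) ppc < ht)
    ∧ PySem.Int.mod (PySem.Int.floordiv (j : Int) ppc - dsc) ht < vcc)

def valA (ppc ht dsc : Int) (j : Nat) : Int :=
  PySem.Int.mod (PySem.Int.floordiv (j : Int) ppc - dsc) ht * ppc + PySem.Int.mod (j : Int) ppc

-- generic: a loop that (conditionally) writes only at its own index, started on replicate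
lemma foldl_ifset_replicate (C : Nat → Bool) (V : Nat → Int) (N : Nat) :
    ∀ k, k ≤ N →
      (List.range k).foldl (fun acc j => if C j then acc.set j (V j) else acc) (List.replicate N (-1))
      = (List.range N).map (fun j => if j < k ∧ C j then V j else -1) := by
  intro k
  induction k with
  | zero =>
    intro _
    simp only [List.range_zero, List.foldl_nil]
    symm
    calc (List.range N).map (fun j => if j < 0 ∧ C j = true then V j else (-1 : Int))
        = (List.range N).map (fun _ => (-1 : Int)) := List.map_congr_left (fun j _ => by simp)
      _ = List.replicate N (-1) := by simp
  | succ k ih =>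
    intro hk
    rw [List.range_succ, List.foldl_append, ih (by omega)]
    simp only [List.foldl_cons, List.foldl_nil]
    by_cases hC : C k
    · simp only [hC, if_pos]
      apply List.ext_getElem
      · simp
      · intro j hj hj'
        simp only [List.getElem_set, List.getElem_map, List.getElem_range] at *
        by_cases hjk : j = k
        · subst hjk; simp [hC]
        · rw [if_neg (by omega)]
          congr 1
          simp only [eq_iff_iff]
          constructor
          · rintro ⟨hh1, hh2⟩; exact ⟨by omega, hh2⟩
          · rintro ⟨hh1, hh2⟩; exact ⟨by omega, hh2⟩
    · simp only [hC, if_false, Bool.false_eq_true]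
      apply List.map_congr_left
      intro j hj
      congr 1
      simp only [eq_iff_iff]
      constructor
      · rintro ⟨hh1, hh2⟩; exact ⟨by omega, hh2⟩
      · rintro ⟨hh1, hh2⟩
        refine ⟨?_, hh2⟩
        rcases Nat.lt_succ_iff_lt_or_eq.mp hh1 with h | h
        · exact h
        · subst h; exact absurd hh2 hC

lemma A_char (trw ppc ht vcc dsc : Int) (h1 : 0 < trw) (h2 : 0 < ppc) (h3 : 0 < ht) (h4 : 0 < vcc) :
    build_horizontal_display_map trw ppc ht vcc dsc
    = (List.range trw.toNat).map (fun j => if condA ppc ht vcc dsc j then valA ppc ht dsc j else -1) := by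
  unfold build_horizontal_display_map
  rw [if_neg (by push Not; exact ⟨h1, h2, h3, h4⟩)]
  have htw : ((trw : Int) - 0).toNat = trw.toNat := by omega
  rw [PySem.List.pyRange_one, htw, List.foldl_map]
  have hstep : (fun (acc : List Int) (k : Nat) =>
      (fun mapping (raster_x : Int) =>
        let crtc_char := PySem.Int.floordiv raster_x ppc
        let pixel_in_char := PySem.Int.mod raster_x ppc
        if ¬ (0 ≤ crtc_char ∧ crtc_char < ht) then mapping
        else
          let display_char := PySem.Int.mod (crtc_char - dsc) ht
          if display_char ≥ vcc then mapping
          else mapping.set raster_x.toNat (display_char * ppc + pixel_in_char)) acc ((0 : Int) + (k : Int)))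
      = (fun acc j => if condA ppc ht vcc dsc j then acc.set j (valA ppc ht dsc j) else acc) := by
    funext acc k
    simp only [condA, valA, zero_add, Int.toNat_natCast, decide_eq_true_eq]
    split_ifs <;> first | rfl | omega
  rw [show (max 0 trw).toNat = trw.toNat from by omega]
  rw [hstep, foldl_ifset_replicate _ _ _ _ le_rfl]
  apply List.map_congr_left
  intro j hj
  simp only [List.mem_range] at hj
  simp [hj]

-- ===== B-side =====

-- display offset and in-raster width of character cell c, and the block B appends for it
def dB (ht dsc : Int) (c : Nat) : Int := PySem.Int.mod ((c : Int) - dsc) ht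

def wB (trw ppc : Int) (c : Nat) : Int := min ppc (trw - (c : Int) * ppc)

def blkB (trw ppc ht vcc dsc : Int) (c : Nat) : List Int :=
  if dB ht dsc c < vcc then
    PySem.List.pyRange (dB ht dsc c * ppc) (dB ht dsc c * ppc + wB trw ppc c) 1
  else List.replicate (wB trw ppc c).toNat (-1)

lemma wB_toNat (trw ppc : Int) (_h2 : 0 < ppc) (c : Nat) :
    (wB trw ppc c).toNat = min ppc.toNat (trw.toNat - c * ppc.toNat) := by
  unfold wB
  have hm : ((c : Int)) * ppc = ((c * ppc.toNat : Nat) : Int) := by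
    push_cast
    rw [Int.toNat_of_nonneg _h2.le]
  rw [hm]
  omega

lemma blkB_length (trw ppc ht vcc dsc : Int) (h2 : 0 < ppc) (c : Nat) :
    (blkB trw ppc ht vcc dsc c).length = (wB trw ppc c).toNat := by
  unfold blkB
  split
  · rw [PySem.List.length_pyRange_one, add_sub_cancel_left]
  · simp

lemma flatMap_blk_length (trw ppc ht vcc dsc : Int) (h2 : 0 < ppc) (n : Nat) :
    ((List.range n).flatMap (blkB trw ppc ht vcc dsc)).length
      = min (n * ppc.toNat) trw.toNat := by
  induction n with
  | zero => simp
  | succ n ih =>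
    rw [List.range_succ, List.flatMap_append]
    simp only [List.length_append, ih, List.flatMap_cons, List.flatMap_nil, List.append_nil,
      blkB_length trw ppc ht vcc dsc h2, wB_toNat trw ppc h2]
    have hs : (n + 1) * ppc.toNat = n * ppc.toNat + ppc.toNat := Nat.succ_mul _ _
    omega

lemma flatMap_blk_getElem? (trw ppc ht vcc dsc : Int) (h2 : 0 < ppc) (n : Nat) :
    ∀ j, j < min (n * ppc.toNat) trw.toNat →
      ((List.range n).flatMap (blkB trw ppc ht vcc dsc))[j]?
      = (blkB trw ppc ht vcc dsc (j / ppc.toNat))[j % ppc.toNat]? := by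
  induction n with
  | zero => intro j hj; omega
  | succ n ih =>
    intro j hj
    rw [List.range_succ, List.flatMap_append, List.getElem?_append]
    have hlen := flatMap_blk_length trw ppc ht vcc dsc h2 n
    have hp : (0 : Nat) < ppc.toNat := by omega
    have hs : (n + 1) * ppc.toNat = n * ppc.toNat + ppc.toNat := Nat.succ_mul _ _
    by_cases hlt : j < min (n * ppc.toNat) trw.toNat
    · rw [if_pos (by omega), ih j hlt]
    · rw [if_neg (by omega)]
      have hnP : n * ppc.toNat ≤ j := by omega
      have hd := Nat.div_add_mod j ppc.toNat
      have hdiv : j / ppc.toNat = n :=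
        Nat.div_eq_of_lt_le hnP (by omega)
      rw [hdiv] at hd
      have hx : n * ppc.toNat = ppc.toNat * n := Nat.mul_comm _ _
      have hmod : j % ppc.toNat = j - n * ppc.toNat := by omega
      have hmin : min (n * ppc.toNat) trw.toNat = n * ppc.toNat := by omega
      simp only [hlen, List.flatMap_cons, List.flatMap_nil, List.append_nil]
      rw [hdiv, hmod, hmin]

lemma B_char (trw ppc ht vcc dsc : Int) (h1 : 0 < trw) (h2 : 0 < ppc) (h3 : 0 < ht) (h4 : 0 < vcc) :
    build_horizontal_display_map_alt trw ppc ht vcc dsc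
    = (List.range trw.toNat).map (fun j => if condA ppc ht vcc dsc j then valA ppc ht dsc j else -1) := by
  have hp : (0 : Nat) < ppc.toNat := by omega
  set N := trw.toNat with hN
  set P := ppc.toNat with hP
  set H := ht.toNat with hH
  have hceil : PySem.Int.floordiv (trw + ppc - 1) ppc = (((N + P - 1) / P : Nat) : Int) := by
    rw [show trw + ppc - 1 = ((N + P - 1 : Nat) : Int) by omega,
        show ppc = ((P : Nat) : Int) by omega, PySem.Int.floordiv_natCast]
  set Q := (N + P - 1) / P with hQ
  have hQP : N ≤ Q * P := by
    have hd := Nat.div_add_mod (N + P - 1) P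
    rw [← hQ] at hd
    have hm := Nat.mod_lt (N + P - 1) hp
    have hc : P * Q = Q * P := Nat.mul_comm _ _
    omega
  set K := min H Q with hK
  have hcc : min ht (PySem.Int.floordiv (trw + ppc - 1) ppc) = ((K : Nat) : Int) := by
    rw [hceil, show ht = ((H : Nat) : Int) by omega, hK]
    omega
  have hcdiv : ∀ j : Nat, PySem.Int.floordiv ((j : Nat) : Int) ppc = ((j / P : Nat) : Int) := by
    intro j
    rw [show ppc = ((P : Nat) : Int) by omega, PySem.Int.floordiv_natCast]
  have hcmod : ∀ j : Nat, PySem.Int.mod ((j : Nat) : Int) ppc = ((j % P : Nat) : Int) := by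
    intro j
    rw [show ppc = ((P : Nat) : Int) by omega, PySem.Int.mod_natCast]
  unfold build_horizontal_display_map_alt
  rw [if_neg (by omega), if_neg (by push Not; exact ⟨h2, h3, h4⟩)]
  rw [hcc]
  dsimp only
  rw [PySem.List.pyRange_one, show (((K : Nat) : Int) - 0).toNat = K by simp, List.foldl_map]
  have hstep : (fun (row : List Int) (c : Nat) =>
      if PySem.Int.mod (((0 : Int) + (c : Int)) - dsc) ht < vcc then
        row ++ PySem.List.pyRange (PySem.Int.mod (((0 : Int) + (c : Int)) - dsc) ht * ppc)
          (PySem.Int.mod (((0 : Int) + (c : Int)) - dsc) ht * ppc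
            + min ppc (trw - ((0 : Int) + (c : Int)) * ppc)) 1
      else row ++ List.replicate (min ppc (trw - ((0 : Int) + (c : Int)) * ppc)).toNat (-1))
      = (fun (row : List Int) (c : Nat) => row ++ blkB trw ppc ht vcc dsc c) := by
    funext row c
    simp only [blkB, dB, wB, zero_add]
    split_ifs <;> rfl
  rw [hstep, PySem.List.foldl_append_eq_flatMap, List.nil_append]
  set L := (List.range K).flatMap (blkB trw ppc ht vcc dsc) with hL
  have hLlen : L.length = min (K * P) N := by
    rw [hP, hN]
    exact flatMap_blk_length trw ppc ht vcc dsc h2 K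
  apply List.ext_getElem?
  intro i
  by_cases hiN : i < N
  · rw [List.getElem?_map, List.getElem?_range hiN, Option.map_some, List.getElem?_append]
    have hdm := Nat.div_add_mod i P
    have hxm : (i / P) * P = P * (i / P) := Nat.mul_comm _ _
    by_cases hiL : i < K * P
    · have hcK : i / P < K := (Nat.div_lt_iff_lt_mul hp).mpr hiL
      have hcH : ((i / P : Nat) : Int) < ht := by omega
      rw [if_pos (by omega : i < L.length),
          flatMap_blk_getElem? trw ppc ht vcc dsc h2 K i (by rw [← hP, ← hN]; omega)]
      simp only [← hP]
      have hmP : i % P < P := Nat.mod_lt _ hp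
      have hcond : condA ppc ht vcc dsc i
          = decide (PySem.Int.mod (((i / P : Nat) : Int) - dsc) ht < vcc) := by
        unfold condA
        rw [hcdiv i]
        simp only [decide_eq_decide]
        constructor
        · rintro ⟨-, h⟩
          exact h
        · intro h
          exact ⟨⟨by positivity, hcH⟩, h⟩
      rw [hcond]
      unfold blkB dB valA
      rw [hcdiv i, hcmod i]
      have hwb : i % P < (wB trw ppc (i / P)).toNat := by
        rw [wB_toNat trw ppc h2 (i / P), ← hP, ← hN]
        omega
      by_cases hd : PySem.Int.mod (((i / P : Nat) : Int) - dsc) ht < vcc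
      · rw [if_pos hd, if_pos (decide_eq_true hd), PySem.List.getElem?_pyRange_one,
            if_pos (by rw [add_sub_cancel_left]; exact hwb)]
      · rw [if_neg hd, if_neg (by simp only [decide_eq_true_eq]; exact hd),
            List.getElem?_replicate, if_pos hwb]
    · rw [if_neg (by omega : ¬ i < L.length), hLlen, List.getElem?_replicate,
          if_pos (by omega)]
      have hcond : condA ppc ht vcc dsc i = false := by
        unfold condA
        rw [hcdiv i]
        simp only [decide_eq_false_iff_not]
        rintro ⟨⟨-, hcht⟩, -⟩
        have hcH : i / P < H := by omega
        have hKc : K ≤ i / P := (Nat.le_div_iff_mul_le hp).mpr (by omega)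
        have hQle : Q ≤ i / P := by omega
        have hm1 := Nat.mul_le_mul_right P hQle
        have hm2 := Nat.div_mul_le_self i P
        omega
      rw [hcond, if_neg (by simp)]
  · rw [List.getElem?_eq_none, List.getElem?_eq_none]
    · simp
      omega
    · rw [List.length_append, List.length_replicate, hLlen]
      omega

-- ===== VERDICT (by name: the statement is the Claim_ definition above) =====
theorem build_horizontal_display_map_spec : Claim_equal_build_horizontal_display_map := by
  intro trw ppc ht vcc dsc _hd
  unfold Spec_build_horizontal_display_map
  by_cases h1 : 0 < trw
  · by_cases h2 : 0 < ppc
    · by_cases h3 : 0 < ht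
      · by_cases h4 : 0 < vcc
        · rw [A_char trw ppc ht vcc dsc h1 h2 h3 h4, B_char trw ppc ht vcc dsc h1 h2 h3 h4]
        · unfold build_horizontal_display_map build_horizontal_display_map_alt
          rw [if_pos (by omega), if_neg (by omega), if_pos (by omega)]
          congr 1; omega
      · unfold build_horizontal_display_map build_horizontal_display_map_alt
        rw [if_pos (by omega), if_neg (by omega), if_pos (by omega)]
        congr 1; omega
    · unfold build_horizontal_display_map build_horizontal_display_map_alt
      rw [if_pos (by omega), if_neg (by omega), if_pos (by omega)]
      congr 1; omega
  · unfold build_horizontal_display_map build_horizontal_display_map_alt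
    rw [if_pos (by omega), if_pos (by omega)]
    simp; omega
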